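-- pv_equiv track=rewrite | github.com/musir34/yeni | akilli_motor.py | _extract_color_from_sku
-- ===== SOURCE A (Python) =====
-- def _extract_color_from_sku(sku: str, model: str, beden: str = '') -> str:
--     """merchant_sku'dan renk çıkarır."""
--     if not sku or not model:
--         return 'Standart'
--     sku = str(sku).strip()
--     prefix = f"{model}-"
--     if sku.startswith(prefix):
--         rest = sku[len(prefix):]
--         # beden numarasını atla
--         i = 0
--         while i < len(rest) and (rest[i].isdigit()):
--             i += 1
--         color = rest[i:].lstrip(' -')
--         return color if color else 'Standart'
--     return 'Standart'
-- ===== SOURCE B (Python) =====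
-- def _extract_color_from_sku(sku: str, model: str, beden: str = '') -> str:
--     if not sku or not model:
--         return 'Standart'
--     s = str(sku).strip()
--     # single-pass state machine: 0 = matching "model-", 1 = skipping size digits,
--     # 2 = skipping ' '/'-' separators, 3 = collecting the color
--     state = 0
--     j = 0
--     out = []
--     for ch in s:
--         if state == 0:
--             if j < len(model):
--                 if ch != model[j]:
--                     return 'Standart'
--                 j += 1
--             elif ch == '-':
--                 state = 1
--             else:
--                 return 'Standart'
--         elif state == 1:
--             if ch.isdigit():
--                 continue
--             elif ch in ' -':
--                 state = 2
--             else: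
--                 out.append(ch)
--                 state = 3
--         elif state == 2:
--             if ch in ' -':
--                 continue
--             out.append(ch)
--             state = 3
--         else:
--             out.append(ch)
--     if state == 0:
--         return 'Standart'
--     color = ''.join(out)
--     return color or 'Standart'
-- ===== Notes on version B (the rewrite author's own statement) =====
-- stated objective: alternative
-- what changed: Replaced A's staged pipeline (startswith check, prefix slice, digit-skipping while loop, lstrip) with a single left-to-right pass over the stripped SKU driven by an explicit 4-state machine (match model+'-', skip digits, skip separators, collect color).
import Mathlib
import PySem

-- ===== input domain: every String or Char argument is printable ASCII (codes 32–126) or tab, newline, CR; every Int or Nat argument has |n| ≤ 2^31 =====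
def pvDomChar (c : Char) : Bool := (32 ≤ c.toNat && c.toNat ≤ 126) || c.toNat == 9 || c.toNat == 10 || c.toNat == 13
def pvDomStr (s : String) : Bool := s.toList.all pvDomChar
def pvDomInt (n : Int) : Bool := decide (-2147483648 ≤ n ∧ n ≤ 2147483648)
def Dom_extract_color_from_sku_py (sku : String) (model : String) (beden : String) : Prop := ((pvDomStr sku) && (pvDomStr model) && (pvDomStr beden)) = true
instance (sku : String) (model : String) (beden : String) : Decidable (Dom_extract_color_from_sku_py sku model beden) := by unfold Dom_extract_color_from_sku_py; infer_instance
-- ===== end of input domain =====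

-- B replaces A's staged startswith/slice/digit-loop/lstrip pipeline with a single
-- left-to-right pass driven by an explicit 4-state machine (alternative; same cost).

-- ===== PORT A =====
-- exact port of A's `while i < len(rest) and rest[i].isdigit(): i += 1`
def pvSkipDigitsIdx (rest : List Char) (i : Nat) : Nat :=
  if h : i < rest.length then
    if PySem.Chars.isdigit (rest[i]'h) then pvSkipDigitsIdx rest (i + 1) else i
  else i
  termination_by rest.length - i
  decreasing_by omega

-- hand port of str.lstrip(' -'): drop leading chars of the set {' ','-'} (exact)
def pvLstripSpDash (cs : List Char) : List Char := cs.dropWhile (fun c => (" -".toList).contains c)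

def extract_color_from_sku_py (sku : String) (model : String) (beden : String) : String :=
  if sku = "" || model = "" then "Standart"
  else
    let s := PySem.Chars.strip sku.toList
    let pre := model.toList ++ ['-']
    if PySem.Chars.startswith s pre then
      let rest := s.drop pre.length      -- sku[len(prefix):], exact since 0 ≤ len(prefix)
      let i := pvSkipDigitsIdx rest 0
      let color := pvLstripSpDash (rest.drop i)   -- rest[i:].lstrip(' -'), 0 ≤ i
      if color = [] then "Standart" else String.ofList color
    else "Standart"

-- ===== PORT B =====
-- B's for-loop over the stripped sku, state machine with early return (none = 'Standart');
-- mr is the unread tail of model (Python tracks index j; mr = model[j:], same values).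
def pvBLoop : List Char → Nat → List Char → List Char → Option (Nat × List Char)
  | [], st, _, out => some (st, out)
  | c :: s, st, mr, out =>
    if st = 0 then
      match mr with
      | mc :: mr' => if c = mc then pvBLoop s 0 mr' out else none
      | [] => if c = '-' then pvBLoop s 1 [] out else none
    else if st = 1 then
      if PySem.Chars.isdigit c then pvBLoop s 1 mr out
      else if (" -".toList).contains c then pvBLoop s 2 mr out
      else pvBLoop s 3 mr (out ++ [c])
    else if st = 2 then
      if (" -".toList).contains c then pvBLoop s 2 mr out
      else pvBLoop s 3 mr (out ++ [c])
    else pvBLoop s 3 mr (out ++ [c])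

-- after the loop: Python's `if state == 0: return 'Standart'` + `color or 'Standart'`
def pvBFinish : Option (Nat × List Char) → String
  | none => "Standart"
  | some (st, out) => if st = 0 then "Standart" else if out = [] then "Standart" else String.ofList out

def extract_color_from_sku_py_alt (sku : String) (model : String) (beden : String) : String :=
  if sku = "" || model = "" then "Standart"
  else pvBFinish (pvBLoop (PySem.Chars.strip sku.toList) 0 model.toList [])

-- ===== PRECONDITION & SPEC =====
def Spec_extract_color_from_sku_py (sku : String) (model : String) (beden : String) (out : String) : Prop := out = extract_color_from_sku_py_alt sku model beden
instance (sku : String) (model : String) (beden : String) (out : String) : Decidable (Spec_extract_color_from_sku_py sku model beden out) := by unfold Spec_extract_color_from_sku_py; infer_instance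

-- ===== CLAIM (what is proved, stated in full; the proofs are below) =====
def Claim_equal_extract_color_from_sku_py : Prop := ∀ (sku : String) (model : String) (beden : String), Dom_extract_color_from_sku_py sku model beden → Spec_extract_color_from_sku_py sku model beden (extract_color_from_sku_py sku model beden)

-- ===== LEMMAS AND PROOFS =====

theorem skipDigits_drop (cs : List Char) (i : Nat) :
    cs.drop (pvSkipDigitsIdx cs i) = (cs.drop i).dropWhile PySem.Chars.isdigit := by
  induction i using pvSkipDigitsIdx.induct (rest := cs) with
  | case1 i h hd ih =>
    rw [pvSkipDigitsIdx]
    rw [dif_pos h, if_pos hd, ih, List.drop_eq_getElem_cons h,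
        List.dropWhile_cons_of_pos hd]
  | case2 i h hd =>
    rw [pvSkipDigitsIdx]
    rw [dif_pos h, if_neg hd, List.drop_eq_getElem_cons h,
        List.dropWhile_cons_of_neg hd, ← List.drop_eq_getElem_cons h]
  | case3 i h =>
    rw [pvSkipDigitsIdx]
    rw [dif_neg h, List.drop_eq_nil_of_le (by omega), List.dropWhile_nil]

-- state 0: the machine matched `m ++ ['-']` as a prefix, then continues in state 1
theorem pvBLoop_state0_prefix (m : List Char) : ∀ (s out : List Char),
    (m ++ ['-']) <+: s → pvBLoop s 0 m out = pvBLoop (s.drop (m.length + 1)) 1 [] out := by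
  induction m with
  | nil =>
    intro s out h
    obtain ⟨t, ht⟩ := h
    subst ht
    simp [pvBLoop]
  | cons mc m' ih =>
    intro s out h
    obtain ⟨t, ht⟩ := h
    subst ht
    simp only [List.cons_append, pvBLoop]
    have := ih (m' ++ ['-'] ++ t) out ⟨t, rfl⟩
    simpa using this

-- state 0: prefix fails → 'Standart' (either early return none, or loop ends in state 0)
theorem pvBLoop_state0_noprefix (m : List Char) : ∀ (s out : List Char),
    ¬ (m ++ ['-']) <+: s → pvBFinish (pvBLoop s 0 m out) = "Standart" := by
  induction m with
  | nil =>
    intro s out h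
    match s with
    | [] => simp [pvBLoop, pvBFinish]
    | c :: s' =>
      have hc : ¬ c = '-' := by rintro rfl; exact h ⟨s', rfl⟩
      simp [pvBLoop, hc, pvBFinish]
  | cons mc m' ih =>
    intro s out h
    match s with
    | [] => simp [pvBLoop, pvBFinish]
    | c :: s' =>
      by_cases hc : c = mc
      · subst hc
        have h' : ¬ (m' ++ ['-']) <+: s' := by
          rintro ⟨t, rfl⟩; exact h ⟨t, by simp⟩
        simp only [pvBLoop]
        exact ih s' out h'
      · simp [pvBLoop, hc, pvBFinish]

-- state 1 consumes the leading digits, then behaves like state 2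
theorem pvBLoop_state1 : ∀ (s mr out : List Char),
    pvBFinish (pvBLoop s 1 mr out) = pvBFinish (pvBLoop (s.dropWhile PySem.Chars.isdigit) 2 mr out) := by
  intro s
  induction s with
  | nil => intro mr out; simp [pvBLoop, pvBFinish]
  | cons c s' ih =>
    intro mr out
    by_cases hd : PySem.Chars.isdigit c
    · rw [List.dropWhile_cons_of_pos hd]
      simp only [pvBLoop, hd, if_true]
      · simpa using ih mr out
    · rw [List.dropWhile_cons_of_neg hd]
      by_cases hs : (" -".toList).contains c
      · simp [pvBLoop, hd, hs]
      · simp [pvBLoop, hd, hs]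

-- state 2 consumes the leading separators, then collects the tail (state 3)
theorem pvBLoop_state2 : ∀ (s mr out : List Char),
    pvBFinish (pvBLoop s 2 mr out)
      = pvBFinish (pvBLoop (s.dropWhile (fun c => (" -".toList).contains c)) 3 mr out) := by
  intro s
  induction s with
  | nil => intro mr out; simp [pvBLoop, pvBFinish]
  | cons c s' ih =>
    intro mr out
    by_cases hs : (" -".toList).contains c
    · rw [List.dropWhile_cons_of_pos hs]
      have h1 : pvBLoop (c :: s') 2 mr out = pvBLoop s' 2 mr out := by
        rcases (show c = ' ' ∨ c = '-' by simpa using hs) with rfl | rfl <;> simp [pvBLoop]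
      rw [h1]
      exact ih mr out
    · rw [List.dropWhile_cons_of_neg hs]
      have hne : ¬ c = ' ' ∧ ¬ c = '-' := by
        constructor <;> rintro rfl <;> simp at hs
      have h1 : pvBLoop (c :: s') 2 mr out = pvBLoop s' 3 mr (out ++ [c]) := by
        simp [pvBLoop, hne.1, hne.2]
      have h2 : pvBLoop (c :: s') 3 mr out = pvBLoop s' 3 mr (out ++ [c]) := by
        simp [pvBLoop]
      rw [h1, h2]

-- state 3 appends the whole remaining input to the accumulator
theorem pvBLoop_state3 : ∀ (s mr out : List Char),
    pvBLoop s 3 mr out = some (3, out ++ s) := by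
  intro s
  induction s with
  | nil => intro mr out; simp [pvBLoop]
  | cons c s' ih => intro mr out; simp [pvBLoop, ih]

-- ===== VERDICT (by name: the statement is the Claim_ definition above) =====
theorem extract_color_from_sku_py_spec : Claim_equal_extract_color_from_sku_py := by
  intro sku model beden _hdom
  unfold Spec_extract_color_from_sku_py extract_color_from_sku_py extract_color_from_sku_py_alt
  by_cases h0 : sku = "" || model = ""
  · simp [h0]
  · simp only [h0, if_false, Bool.false_eq_true]
    set s := PySem.Chars.strip sku.toList with hs
    by_cases hp : PySem.Chars.startswith s (model.toList ++ ['-'])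
    · have hpre : (model.toList ++ ['-']) <+: s := (PySem.Chars.startswith_iff s (model.toList ++ ['-'])).1 hp
      simp only [hp, if_true]
      rw [pvBLoop_state0_prefix _ _ _ hpre, pvBLoop_state1, pvBLoop_state2, pvBLoop_state3,
          pvLstripSpDash, skipDigits_drop, List.drop_zero]
      have hlen : (model.toList ++ ['-']).length = model.toList.length + 1 := by simp
      rw [hlen]
      by_cases hc : ((s.drop (model.toList.length + 1)).dropWhile PySem.Chars.isdigit).dropWhile
          (fun c => (" -".toList).contains c) = []
      · simp [pvBFinish, hc]
      · simp [pvBFinish, hc]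
    · have hnp : ¬ (model.toList ++ ['-']) <+: s := fun h =>
        hp ((PySem.Chars.startswith_iff s (model.toList ++ ['-'])).2 h)
      simp only [hp, if_false, Bool.false_eq_true]
      exact (pvBLoop_state0_noprefix _ _ _ hnp).symm
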